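-- pv_equiv track=rewrite | github.com/vaishu567/dsapracrepo | leetcodeproblems/example.py | the_order
-- ===== SOURCE A (Python) =====
-- from collections import deque
--
-- def the_order(n):
--     if n <= 1:
--         return [1]
--     q = deque()
--     i = 1
--     while i <= n:
--         q.append(i)
--         i += 1
--     ans = []
--     while q:
--         k = q.popleft()
--         q.append(k)
--         front = q.popleft()
--         ans.append(front)
--     return ans
-- ===== SOURCE B (Python) =====
-- def the_order(n):
--     if n <= 1:
--         return [1]
--     xs = list(range(1, n + 1))
--     out = []
--     skip = True
--     while len(xs) > 1:
--         keep = []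
--         for x in xs:
--             if skip:
--                 keep.append(x)
--             else:
--                 out.append(x)
--             skip = not skip
--         xs = keep
--     out.append(xs[0])
--     return out
-- ===== Notes on version B (the rewrite author's own statement) =====
-- stated objective: alternative
-- what changed: Replaces the element-at-a-time rotating deque (popleft+append to skip, popleft to remove) by repeated whole sieving passes over a plain list: each pass splits the list into kept and removed elements via an alternating skip flag carried across passes.
import Mathlib
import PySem

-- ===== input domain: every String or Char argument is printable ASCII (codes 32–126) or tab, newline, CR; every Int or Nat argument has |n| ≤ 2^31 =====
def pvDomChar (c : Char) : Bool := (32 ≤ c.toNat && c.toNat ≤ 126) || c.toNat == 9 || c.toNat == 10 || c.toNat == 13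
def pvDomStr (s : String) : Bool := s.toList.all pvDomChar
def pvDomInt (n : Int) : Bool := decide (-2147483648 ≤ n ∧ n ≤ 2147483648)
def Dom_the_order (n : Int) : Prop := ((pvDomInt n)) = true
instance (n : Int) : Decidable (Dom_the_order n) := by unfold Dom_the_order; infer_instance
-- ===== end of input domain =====

-- B replaces A's one-at-a-time rotating deque (popleft+append to skip, popleft to remove)
-- by whole sieving passes over a plain list with a carried skip flag; objective: alternative.

-- ===== PORT A =====
-- while i <= n: q.append(i); i += 1
def the_order_build (i n : Int) : List Int :=
  if i ≤ n then i :: the_order_build (i + 1) n else []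
termination_by (n + 1 - i).toNat
decreasing_by omega

-- while q: k = q.popleft(); q.append(k); front = q.popleft(); ans.append(front)
-- (the three-way match only makes the two popleft's total: t ++ [k] is never empty)
def the_order_loop : List Int → List Int
  | [] => []
  | [k] => [k]
  | k :: f :: t => f :: the_order_loop (t ++ [k])
termination_by q => q.length
decreasing_by simp

def the_order (n : Int) : List Int :=
  if n ≤ 1 then [1] else the_order_loop (the_order_build 1 n)

-- ===== PORT B =====
-- helpers: the elements at even / odd positions of a list (what one sieving pass keeps / removes)
def the_order_evens : List Int → List Int
  | [] => []
  | [x] => [x]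
  | x :: _ :: t => x :: the_order_evens t

def the_order_odds : List Int → List Int
  | [] => []
  | [_] => []
  | _ :: y :: t => y :: the_order_odds t

-- evens/odds unfold one step at a time (used by the_order_pass_eq, which the port's decreasing_by cites)
lemma the_order_evens_cons_odds (L : Nat) : ∀ (l : List Int), l.length = L → ∀ x : Int,
    the_order_evens (x :: l) = x :: the_order_odds l ∧ the_order_odds (x :: l) = the_order_evens l := by
  induction L using Nat.strong_induction_on with
  | _ L IH =>
  intro l hlen x
  cases l with
  | nil => simp [the_order_evens, the_order_odds]
  | cons y t =>
    constructor
    · show x :: the_order_evens t = x :: the_order_odds (y :: t)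
      rw [(IH t.length (by simp at hlen; omega) t rfl y).2]
    · show y :: the_order_odds t = the_order_evens (y :: t)
      rw [(IH t.length (by simp at hlen; omega) t rfl y).1]

-- inner 'for x in xs' loop of Source B: thread (keep, out, skip) through one pass
def the_order_pass (xs keep out : List Int) (skip : Bool) : List Int × List Int × Bool :=
  match xs with
  | [] => (keep, out, skip)
  | x :: t =>
      if skip then the_order_pass t (keep ++ [x]) out (!skip)
      else the_order_pass t keep (out ++ [x]) (!skip)

-- what one pass computes (cited by the_order_bloop's decreasing_by, hence stated here)
lemma the_order_pass_eq (xs : List Int) : ∀ (keep out : List Int) (skip : Bool),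
    the_order_pass xs keep out skip =
      (keep ++ (if skip then the_order_evens xs else the_order_odds xs),
       out ++ (if skip then the_order_odds xs else the_order_evens xs),
       if xs.length % 2 = 0 then skip else !skip) := by
  induction xs with
  | nil => intro keep out skip; simp [the_order_pass, the_order_evens, the_order_odds]
  | cons x t ih =>
    intro keep out skip
    rw [the_order_pass]
    obtain ⟨hec, hoc⟩ := the_order_evens_cons_odds t.length t rfl x
    have hm : (x :: t).length % 2 = (t.length + 1) % 2 := by simp
    cases skip with
    | true =>
      rw [if_pos rfl, ih]
      simp only [hec, hoc, hm, Bool.not_true, Prod.mk.injEq]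
      refine ⟨by simp, by simp, ?_⟩
      rcases Nat.even_or_odd t.length with h | h
      · have h0 : t.length % 2 = 0 := Nat.even_iff.mp h
        have h1 : (t.length + 1) % 2 = 1 := by omega
        simp [h0, h1]
      · have h0 : t.length % 2 = 1 := Nat.odd_iff.mp h
        have h1 : (t.length + 1) % 2 = 0 := by omega
        simp [h0, h1]
    | false =>
      rw [if_neg (by simp), ih]
      simp only [hec, hoc, hm, Bool.not_false, Prod.mk.injEq]
      refine ⟨by simp, by simp, ?_⟩
      rcases Nat.even_or_odd t.length with h | h
      · have h0 : t.length % 2 = 0 := Nat.even_iff.mp h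
        have h1 : (t.length + 1) % 2 = 1 := by omega
        simp [h0, h1]
      · have h0 : t.length % 2 = 1 := Nat.odd_iff.mp h
        have h1 : (t.length + 1) % 2 = 0 := by omega
        simp [h0, h1]

lemma the_order_evens_odds_length (L : Nat) : ∀ xs : List Int, xs.length = L →
    (the_order_evens xs).length = (L + 1) / 2 ∧ (the_order_odds xs).length = L / 2 := by
  induction L using Nat.strong_induction_on with
  | _ L IH =>
  intro xs hlen
  match xs with
  | [] => simp at hlen; simp [the_order_evens, the_order_odds]; omega
  | [x] => simp at hlen; simp [the_order_evens, the_order_odds]; omega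
  | x :: y :: t =>
    obtain ⟨he, ho⟩ := IH t.length (by simp at hlen; omega) t rfl
    constructor
    · show (x :: the_order_evens t).length = (L + 1) / 2
      simp at hlen; simp [he]; omega
    · show (y :: the_order_odds t).length = L / 2
      simp at hlen; simp [ho]; omega

-- while len(xs) > 1: one pass; then out.append(xs[0])
def the_order_bloop (xs out : List Int) (skip : Bool) : List Int :=
  if _hgt : 1 < xs.length then
    match h : the_order_pass xs [] out skip with
    | (keep, out', skip') => the_order_bloop keep out' skip'
  else
    match xs with
    | x :: _ => out ++ [x]
    | [] => out  -- unreachable: the loop is entered with xs nonempty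
termination_by xs.length
decreasing_by
  rw [the_order_pass_eq] at h
  injection h with h1 h2
  obtain ⟨he, ho⟩ := the_order_evens_odds_length xs.length xs rfl
  rw [List.nil_append] at h1
  split at h1 <;> simp only [← h1] <;> omega

def the_order_alt (n : Int) : List Int :=
  if n ≤ 1 then [1] else the_order_bloop (PySem.List.pyRange 1 (n + 1) 1) [] true

-- ===== PRECONDITION & SPEC =====
def Spec_the_order (n : Int) (out : List Int) : Prop := out = the_order_alt n
instance (n : Int) (out : List Int) : Decidable (Spec_the_order n out) := by unfold Spec_the_order; infer_instance

-- ===== CLAIM (what is proved, stated in full; the proofs are below) =====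
def Claim_equal_the_order : Prop := ∀ (n : Int), Dom_the_order n → Spec_the_order n (the_order n)

-- ===== LEMMAS AND PROOFS =====

lemma the_order_build_eq_pyRange (i n : Int) :
    the_order_build i n = PySem.List.pyRange i (n + 1) 1 := by
  induction i using the_order_build.induct (n := n) with
  | case1 i h ih =>
    rw [the_order_build, if_pos h, ih]
    exact (PySem.List.pyRange_one_cons (by omega)).symm
  | case2 i h =>
    rw [the_order_build, if_neg h, PySem.List.pyRange_one_eq_nil (by omega)]

-- one full skip-remove pass of the deque loop over an even-length prefix
lemma the_order_loop_pass (k : Nat) : ∀ (pairs ys : List Int), pairs.length = 2 * k →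
    the_order_loop (pairs ++ ys)
      = the_order_odds pairs ++ the_order_loop (ys ++ the_order_evens pairs) := by
  induction k with
  | zero =>
    intro pairs ys hlen
    match pairs with
    | [] => simp [the_order_odds, the_order_evens]
  | succ k ih =>
    intro pairs ys hlen
    match pairs with
    | a :: b :: t =>
      show the_order_loop (a :: b :: (t ++ ys)) = _
      rw [the_order_loop, List.append_assoc,
          ih t (ys ++ [a]) (by simp at hlen; omega)]
      show (b :: the_order_odds t) ++ _ = (b :: the_order_odds t) ++ _
      simp [the_order_evens]

-- evens/odds distribute over an even-length prefix
lemma the_order_evens_odds_append (k : Nat) : ∀ (u v : List Int), u.length = 2 * k →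
    the_order_evens (u ++ v) = the_order_evens u ++ the_order_evens v ∧
    the_order_odds (u ++ v) = the_order_odds u ++ the_order_odds v := by
  induction k with
  | zero =>
    intro u v hlen
    match u with
    | [] => simp [the_order_evens, the_order_odds]
  | succ k ih =>
    intro u v hlen
    match u with
    | a :: b :: t =>
      obtain ⟨he, ho⟩ := ih t v (by simp at hlen; omega)
      constructor
      · show a :: the_order_evens (t ++ v) = (a :: the_order_evens t) ++ _
        rw [he]; simp
      · show b :: the_order_odds (t ++ v) = (b :: the_order_odds t) ++ _
        rw [ho]; simp

-- one unfolding of the while loop, with the pass already evaluated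
lemma the_order_bloop_unfold (xs : List Int) (hgt : 1 < xs.length) (o : List Int) (sk : Bool) :
    the_order_bloop xs o sk =
      the_order_bloop (if sk then the_order_evens xs else the_order_odds xs)
        (o ++ (if sk then the_order_odds xs else the_order_evens xs))
        (if xs.length % 2 = 0 then sk else !sk) := by
  rw [the_order_bloop, dif_pos hgt]
  split
  next keep out' skip' heq =>
    rw [the_order_pass_eq, List.nil_append] at heq
    simp only [Prod.mk.injEq] at heq
    obtain ⟨h1, h2, h3⟩ := heq
    rw [h1, h2, h3]

-- Invariant: with skip=true the pending deque is xs itself; with skip=false it is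
-- xs rotated so that the just-skipped last element stands in front.
lemma the_order_bloop_eq_loop (L : Nat) : ∀ (xs out : List Int) (hne : xs ≠ []),
    xs.length = L →
    the_order_bloop xs out true = out ++ the_order_loop xs ∧
    the_order_bloop xs out false = out ++ the_order_loop (xs.getLast hne :: xs.dropLast) := by
  induction L using Nat.strong_induction_on with
  | _ L IH =>
  intro xs out hne hlen
  by_cases hL : 1 < L
  case neg =>
    match xs with
    | [x] => constructor <;> simp [the_order_bloop, the_order_loop]
    | [] => exact absurd rfl hne
    | x :: y :: t => exfalso; simp at hlen; omega
  case pos =>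
    have hgt : 1 < xs.length := by omega
    constructor
    · -- skip = true: the deque is xs itself
      rw [the_order_bloop_unfold xs hgt out true]
      simp only [if_true]
      have ⟨hel, hol⟩ := the_order_evens_odds_length xs.length xs rfl
      have hene : the_order_evens xs ≠ [] :=
        List.ne_nil_of_length_pos (by rw [hel]; omega)
      rcases Nat.even_or_odd L with hpar | hpar
      · -- even length: flag stays true, survivors are the even positions
        obtain ⟨k, hk0⟩ := hpar
        have hk : L = 2 * k := by omega
        have h2 : xs.length % 2 = 0 := by omega
        rw [if_pos h2]
        rw [(IH (the_order_evens xs).length (by rw [hel]; omega)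
              (the_order_evens xs) (out ++ the_order_odds xs) hene rfl).1]
        have hP := the_order_loop_pass k xs [] (by omega)
        simp only [List.append_nil, List.nil_append] at hP
        rw [hP, List.append_assoc]
      · -- odd length: the last element is kept and the flag flips
        obtain ⟨k, hk⟩ : ∃ k, L = 2 * k + 1 := hpar
        have hk1 : 1 ≤ k := by omega
        have h2 : ¬ xs.length % 2 = 0 := by omega
        rw [if_neg h2]
        simp only [Bool.not_true]
        have hxu : xs.dropLast ++ [xs.getLast hne] = xs := List.dropLast_append_getLast hne
        have hul : xs.dropLast.length = 2 * k := by simp; omega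
        obtain ⟨hea, hoa⟩ := the_order_evens_odds_append k xs.dropLast [xs.getLast hne] hul
        rw [hxu] at hea hoa
        have hez : the_order_evens [xs.getLast hne] = [xs.getLast hne] := rfl
        have hoz : the_order_odds [xs.getLast hne] = [] := rfl
        rw [hez] at hea; rw [hoz, List.append_nil] at hoa
        rw [(IH (the_order_evens xs).length (by rw [hel]; omega)
              (the_order_evens xs) (out ++ the_order_odds xs) hene rfl).2]
        have hgl : (the_order_evens xs).getLast hene = xs.getLast hne := by
          have ha : (the_order_evens xs).getLast? = some ((the_order_evens xs).getLast hene) :=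
            List.getLast?_eq_some_getLast hene
          have hb : (the_order_evens xs).getLast? = some (xs.getLast hne) := by
            rw [hea, List.getLast?_concat]
          exact Option.some.inj (ha.symm.trans hb)
        have hdl : (the_order_evens xs).dropLast = the_order_evens xs.dropLast := by
          rw [hea]; exact List.dropLast_concat ..
        rw [hgl, hdl]
        have hP := the_order_loop_pass k xs.dropLast [xs.getLast hne] hul
        rw [hxu] at hP
        rw [hP, hoa, List.append_assoc]
        simp
    · -- skip = false: the just-skipped last element stands before xs in the deque
      obtain ⟨x0, t, rfl⟩ : ∃ x0 t, xs = x0 :: t := by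
        cases xs with
        | nil => exact absurd rfl hne
        | cons a u => exact ⟨a, u, rfl⟩
      have htne : t ≠ [] := by
        intro hh; rw [hh] at hlen; simp at hlen; omega
      have hgl : (x0 :: t).getLast hne = t.getLast htne := List.getLast_cons htne
      have hdl : (x0 :: t).dropLast = x0 :: t.dropLast := List.dropLast_cons_of_ne_nil htne
      rw [hgl, hdl, the_order_loop]
      rw [List.dropLast_append_getLast htne]
      -- reduce the false-start loop to a true-start loop on the tail
      have key : the_order_bloop (x0 :: t) out false = the_order_bloop t (out ++ [x0]) true := by
        by_cases ht1 : 1 < t.length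
        · rw [the_order_bloop_unfold (x0 :: t) hgt out false,
              the_order_bloop_unfold t ht1 (out ++ [x0]) true]
          simp only [Bool.false_eq_true, if_true, if_false, Bool.not_false, Bool.not_true]
          obtain ⟨hec, hoc⟩ := the_order_evens_cons_odds t.length t rfl x0
          have hB : out ++ the_order_evens (x0 :: t) = (out ++ [x0]) ++ the_order_odds t := by
            rw [hec]; simp
          have hC : (if (x0 :: t).length % 2 = 0 then false else true)
              = (if t.length % 2 = 0 then true else false) := by
            rcases Nat.even_or_odd t.length with hq | hq
            · have h0 : t.length % 2 = 0 := Nat.even_iff.mp hq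
              have h1 : (x0 :: t).length % 2 = 1 := by simp; omega
              simp only [h1, h0]
              norm_num
            · have h0 : t.length % 2 = 1 := Nat.odd_iff.mp hq
              have h1 : (x0 :: t).length % 2 = 0 := by simp; omega
              simp only [h1, h0]
              norm_num
          rw [hoc, hB, hC]
        · obtain ⟨y, rfl⟩ : ∃ y, t = [y] := by
            match t, htne with
            | a :: u, _ =>
              match u with
              | [] => exact ⟨a, rfl⟩
              | b :: w => simp at ht1
          simp [the_order_bloop, the_order_pass]
      rw [key, (IH t.length (by simp at hlen; omega) t (out ++ [x0]) htne rfl).1]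
      simp

-- ===== VERDICT (by name: the statement is the Claim_ definition above) =====
theorem the_order_spec : Claim_equal_the_order := by
  intro n _
  unfold Spec_the_order the_order the_order_alt
  by_cases hn : n ≤ 1
  · simp [hn]
  · simp only [hn, if_false]
    rw [the_order_build_eq_pyRange]
    have hne : PySem.List.pyRange 1 (n + 1) 1 ≠ [] := by
      have := PySem.List.length_pyRange_one 1 (n + 1)
      intro hh; rw [hh] at this; simp at this; omega
    have := (the_order_bloop_eq_loop (PySem.List.pyRange 1 (n + 1) 1).length
      (PySem.List.pyRange 1 (n + 1) 1) [] hne rfl).1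
    rw [this, List.nil_append]
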